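-- pv_equiv track=rewrite | github.com/PaolaBird/symptomVid | Backend/prolog.py | sintomas
-- ===== SOURCE A (Python) =====
-- def sintomas(answers):
--     questions = [
--         1,
--         1,
--         1,
--         1,
--         1,
--         1,
--         1,
--         2,
--         2,
--         3,
--         3,
--         3,
--     ]
--     suma = 0
--     sugerencia = ""
--     for x in range(0, len(questions)):
--         if answers[x] == "y":
--             suma += questions[x]
--     if 0 <= suma <= 2:
--         sugerencia = {
--             "type": "1",
--             "result": "Puede estar relacionado con estrés. Mantenerse observando.",
--         }
--
--     elif 3 <= suma <= 5:
--         sugerencia = {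
--             "type": "2",
--             "result": "Hidratese adecuadamente, mantenga una buena higiene personal. Observe y revalore en 2 días.",
--         }
--     elif 6 <= suma <= 12:
--         sugerencia = {"type": "3", "result": "Debe ir a una consulta médica."}
--
--     elif 13 <= suma <= 20:
--         sugerencia = {
--             "type": "4",
--             "result": "REPORTESE DE INMEDIATO A EPIDEMIOLOGÍA.",
--         }
--
--     return sugerencia
-- ===== SOURCE B (Python) =====
-- def sintomas(answers):
--     if len(answers) < 12:
--         # the questionnaire has 12 questions; A raises IndexError here too
--         raise IndexError("need 12 answers")
--     # group the 12 questions by weight and count the "y" answers per slice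
--     suma = (answers[0:7].count("y")
--             + 2 * answers[7:9].count("y")
--             + 3 * answers[9:12].count("y"))
--     # level = number of thresholds strictly exceeded (suma is always in 0..20)
--     nivel = (suma > 2) + (suma > 5) + (suma > 12)
--     mensajes = [
--         {"type": "1", "result": "Puede estar relacionado con estrés. Mantenerse observando."},
--         {"type": "2", "result": "Hidratese adecuadamente, mantenga una buena higiene personal. Observe y revalore en 2 días."},
--         {"type": "3", "result": "Debe ir a una consulta médica."},
--         {"type": "4", "result": "REPORTESE DE INMEDIATO A EPIDEMIOLOGÍA."},
--     ]
--     return mensajes[nivel]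
-- ===== Notes on version B (the rewrite author's own statement) =====
-- stated objective: alternative
-- what changed: Replaces the per-index weighted loop by per-weight-group slice counts (count of 'y' in answers[0:7], [7:9], [9:12]) and replaces the four-branch if/elif range ladder by an arithmetic threshold count indexing a message table.
import Mathlib
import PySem

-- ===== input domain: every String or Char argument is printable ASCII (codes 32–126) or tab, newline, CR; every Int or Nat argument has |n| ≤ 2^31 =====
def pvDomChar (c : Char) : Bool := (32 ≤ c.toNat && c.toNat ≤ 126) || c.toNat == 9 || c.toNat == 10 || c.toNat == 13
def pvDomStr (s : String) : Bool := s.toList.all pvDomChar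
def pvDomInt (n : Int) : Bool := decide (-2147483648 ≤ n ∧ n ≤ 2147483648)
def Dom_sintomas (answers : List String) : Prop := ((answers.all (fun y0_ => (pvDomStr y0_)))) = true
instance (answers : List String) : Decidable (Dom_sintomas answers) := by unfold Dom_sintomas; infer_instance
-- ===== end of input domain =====

-- B scores by counting "y" per weight group over three slices and picks the message by an
-- arithmetic threshold count into a table, instead of A's per-index loop and if/elif ladder
-- (objective: alternative).


-- ===== PORT A =====
def questionsA : List Int := [1, 1, 1, 1, 1, 1, 1, 2, 2, 3, 3, 3]

-- Literal port of A: pyGetD is exact under Pre_ (every index 0..11 is then in range; outside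
-- Pre_ Python raises IndexError).  The final [] stands for Python's unreachable "" default.
def sintomas (answers : List String) : List (String × String) :=
  let suma : Int := (PySem.List.pyRange 0 (PySem.List.len questionsA)).foldl
    (fun suma x =>
      if PySem.List.pyGetD answers x "" == "y" then suma + PySem.List.pyGetD questionsA x 0 else suma) 0
  if 0 ≤ suma ∧ suma ≤ 2 then
    [("type", "1"), ("result", "Puede estar relacionado con estrés. Mantenerse observando.")]
  else if 3 ≤ suma ∧ suma ≤ 5 then
    [("type", "2"), ("result", "Hidratese adecuadamente, mantenga una buena higiene personal. Observe y revalore en 2 días.")]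
  else if 6 ≤ suma ∧ suma ≤ 12 then
    [("type", "3"), ("result", "Debe ir a una consulta médica.")]
  else if 13 ≤ suma ∧ suma ≤ 20 then
    [("type", "4"), ("result", "REPORTESE DE INMEDIATO A EPIDEMIOLOGÍA.")]
  else []

-- ===== PORT B =====
def mensajesB : List (List (String × String)) :=
  [[("type", "1"), ("result", "Puede estar relacionado con estrés. Mantenerse observando.")],
   [("type", "2"), ("result", "Hidratese adecuadamente, mantenga una buena higiene personal. Observe y revalore en 2 días.")],
   [("type", "3"), ("result", "Debe ir a una consulta médica.")],
   [("type", "4"), ("result", "REPORTESE DE INMEDIATO A EPIDEMIOLOGÍA.")]]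

-- B: (its len<12 IndexError guard lies outside Pre_, where nothing is claimed)
-- three slice counts, weighted; the level is how many thresholds suma strictly exceeds
-- (Python's bool-sum `(suma>2)+(suma>5)+(suma>12)`), used to index the message table.
def sintomas_alt (answers : List String) : List (String × String) :=
  let suma : Int :=
    (PySem.List.count (PySem.List.slice answers (some 0) (some 7)) "y" : Int)
    + 2 * (PySem.List.count (PySem.List.slice answers (some 7) (some 9)) "y" : Int)
    + 3 * (PySem.List.count (PySem.List.slice answers (some 9) (some 12)) "y" : Int)
  let nivel : Int :=
    (if 2 < suma then 1 else 0) + (if 5 < suma then 1 else 0) + (if 12 < suma then 1 else 0)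
  PySem.List.pyGetD mensajesB nivel []

-- ===== PRECONDITION & SPEC =====
-- Python A indexes answers[0..11] and raises IndexError on shorter lists; Pre_ excludes exactly those.
def Pre_sintomas (answers : List String) : Prop := 12 ≤ answers.length
instance (answers : List String) : Decidable (Pre_sintomas answers) := by unfold Pre_sintomas; infer_instance
def pvWitness_sintomas : List String :=
  ["y", "n", "y", "n", "y", "n", "y", "n", "y", "n", "y", "n"]

def Spec_sintomas (answers : List String) (out : List (String × String)) : Prop := out = sintomas_alt answers
instance (answers : List String) (out : List (String × String)) : Decidable (Spec_sintomas answers out) := by unfold Spec_sintomas; infer_instance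

-- ===== CLAIM (what is proved, stated in full; the proofs are below) =====
def Claim_equal_sintomas : Prop := ∀ (answers : List String), Dom_sintomas answers → Pre_sintomas answers → Spec_sintomas answers (sintomas answers)
-- ===== LEMMAS AND PROOFS =====

theorem fold_zip_eq (qs : List Int) (ans : List String) (acc : Int) (h : qs.length ≤ ans.length) :
    (List.range qs.length).foldl
      (fun s x => if ans.getD x "" == "y" then s + qs.getD x 0 else s) acc
    = (qs.zip ans).foldl (fun s p => if p.2 == "y" then s + p.1 else s) acc := by
  induction qs generalizing ans acc with
  | nil => simp
  | cons q qs ih =>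
    cases ans with
    | nil => simp at h
    | cons a ans =>
      rw [List.length_cons, List.range_succ_eq_map]
      simp only [List.foldl_cons, List.foldl_map, List.getD_cons_succ, List.getD_cons_zero,
        List.zip_cons_cons, Nat.succ_eq_add_one]
      exact ih ans _ (by simpa using h)

-- zipping a concatenation splits the right list at the boundary
theorem zip_append_split (xs ys : List Int) (l : List String) :
    (xs ++ ys).zip l = xs.zip (l.take xs.length) ++ ys.zip (l.drop xs.length) := by
  induction xs generalizing l with
  | nil => simp
  | cons x xs ih =>
    cases l with
    | nil => simp
    | cons a l => simp [ih]

-- zipping a constant-weight block pairs the weight with a prefix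
theorem zip_replicate (n : Nat) (w : Int) (l : List String) :
    (List.replicate n w).zip l = (l.take n).map (fun x => (w, x)) := by
  induction n generalizing l with
  | zero => simp
  | succ n ih => cases l <;> simp [List.replicate_succ, ih]

-- a constant-weight score block is the weight times the "y"-count
theorem fold_const_weight (l : List String) (w acc : Int) :
    (l.map fun x => (w, x)).foldl (fun s p => if p.2 == "y" then s + p.1 else s) acc
      = acc + w * (l.count "y" : Int) := by
  induction l generalizing acc with
  | nil => simp
  | cons a l ih =>
    simp only [List.map_cons, List.foldl_cons, List.count_cons]
    by_cases h : a == "y" <;> simp only [h, if_true, ih] <;> push_cast <;> ring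

-- the if/elif ladder agrees with table indexing by the threshold count, for any score in 0..20
theorem map_sel (s : Int) (h0 : 0 ≤ s) (h20 : s ≤ 20) :
    (if 0 ≤ s ∧ s ≤ 2 then
      [("type", "1"), ("result", "Puede estar relacionado con estrés. Mantenerse observando.")]
    else if 3 ≤ s ∧ s ≤ 5 then
      [("type", "2"), ("result", "Hidratese adecuadamente, mantenga una buena higiene personal. Observe y revalore en 2 días.")]
    else if 6 ≤ s ∧ s ≤ 12 then
      [("type", "3"), ("result", "Debe ir a una consulta médica.")]
    else if 13 ≤ s ∧ s ≤ 20 then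
      [("type", "4"), ("result", "REPORTESE DE INMEDIATO A EPIDEMIOLOGÍA.")]
    else [])
    = PySem.List.pyGetD mensajesB
        ((if 2 < s then 1 else 0) + (if 5 < s then 1 else 0) + (if 12 < s then 1 else 0)) [] := by
  split_ifs <;> first | rfl | omega

-- ===== VERDICT (by name: the statement is the Claim_ definition above) =====
theorem sintomas_spec : Claim_equal_sintomas := by
  intro answers _ hpre
  unfold Pre_sintomas at hpre
  unfold Spec_sintomas sintomas sintomas_alt
  have hA :
      (PySem.List.pyRange 0 (PySem.List.len questionsA)).foldl
        (fun suma x =>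
          if PySem.List.pyGetD answers x "" == "y" then suma + PySem.List.pyGetD questionsA x 0
          else suma) 0
      = (questionsA.zip answers).foldl (fun s p => if p.2 == "y" then s + p.1 else s) 0 := by
    have hlen : PySem.List.len questionsA = ((12 : Nat) : Int) := by decide
    rw [hlen, PySem.List.pyRange_zero_natCast, List.foldl_map]
    simp only [PySem.List.pyGetD_natCast]
    have h12 : (12 : Nat) = questionsA.length := by decide
    rw [h12]
    exact fold_zip_eq questionsA answers 0 (by simp [questionsA]; omega)
  have hsplit : questionsA = List.replicate 7 (1 : Int)
      ++ (List.replicate 2 (2 : Int) ++ List.replicate 3 (3 : Int)) := by decide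
  have hzip :
      (questionsA.zip answers).foldl (fun s p => if p.2 == "y" then s + p.1 else s) 0
      = ((0 + 1 * ((answers.take 7).count "y" : Int))
          + 2 * (((answers.drop 7).take 2).count "y" : Int))
          + 3 * ((((answers.drop 7).drop 2).take 3).count "y" : Int) := by
    rw [hsplit, zip_append_split, List.foldl_append, zip_append_split,
        List.foldl_append, zip_replicate, zip_replicate, zip_replicate,
        fold_const_weight, fold_const_weight, fold_const_weight]
    simp [List.take_take]
  have e0 : PySem.List.slice answers (some 0) (some 7) = answers.take 7 := by
    rw [PySem.List.slice_toNat answers (by norm_num) (by norm_num)]; simp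
  have e1 : PySem.List.slice answers (some 7) (some 9) = (answers.drop 7).take 2 := by
    rw [PySem.List.slice_toNat answers (by norm_num) (by norm_num)]; simp
  have e2 : PySem.List.slice answers (some 9) (some 12) = (answers.drop 9).take 3 := by
    rw [PySem.List.slice_toNat answers (by norm_num) (by norm_num)]; simp
  rw [hA, hzip]
  simp only [e0, e1, e2, PySem.List.count_eq, List.drop_drop, one_mul, zero_add]
  norm_num
  have b1 : List.count "y" (answers.take 7) ≤ 7 :=
    le_trans List.count_le_length (by simp)
  have b2 : List.count "y" ((answers.drop 7).take 2) ≤ 2 :=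
    le_trans List.count_le_length (by simp)
  have b3 : List.count "y" ((answers.drop 9).take 3) ≤ 3 :=
    le_trans List.count_le_length (by simp)
  exact map_sel _ (by positivity) (by omega)
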